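-- pv_equiv track=rewrite | github.com/Henry839/Negotiation | colored_trail/policy/random_policy.py | generate_exchange_choices
-- ===== SOURCE A (Python) =====
-- def generate_choices(chips):
--     """
--     Generate all possible combinations for an agent's chips
--     Args:
--         chip: an agent's chips
--         eg: [1,1,2,0]
--     Returns:
--         ans: All possible combinations for an agent's chip
--         eg:[[0, 0, 1, 0], [0, 0, 2, 0], [0, 1, 0, 0], [0, 1, 1, 0], [0, 1, 2, 0], [1, 0, 0, 0],
--         [1, 0, 1, 0], [1, 0, 2, 0], [1, 1, 0, 0], [1, 1, 1, 0], [1, 1, 2, 0]]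
--     """
--     def gen(cnts, idx=0, choice=[]):
--         if idx >= len(cnts):
--             if choice == [0,0,0,0] or choice == [1,1,1,1]:
--                 return None
--             return choice
--         choices = []
--         for c in range(cnts[idx] + 1):
--             choice.append(c)
--             tmp = gen(cnts, idx + 1, choice)
--             if tmp != None:
--                  choices += tmp
--             choice.pop()
--         return choices
--     choices = gen(chips)
--     ans = []
--     for i in range(0, len(choices), 4):
--         ans.append(choices[i:i + 4])
--     return ans
--
-- def generate_exchange_choices(my_chips,other_chips):
--     """
--     Generate all possible exchange combinations for two agents's chips
--     Args:
--         my_chips: my agent's chips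
--         other_chips: the other agent's chips
--     Returns:
--         All possible exchange combinations for two chips
--     """
--     def _isvalid(my_chip,other_chip):
--         for i in range(len(my_chip)):
--             if my_chip[i] > 0 and other_chip[i] > 0:
--                 return False
--         return True
--     exchange_choices = []
--     my_choices = generate_choices(my_chips)
--     other_choices = generate_choices(other_chips)
--     for i in range(len(my_choices)):
--         for j in range(len(other_choices)):
--             if _isvalid(my_choices[i],other_choices[j]):
--                 exchange_choices.append(my_choices[i]+other_choices[j])
--     return exchange_choices
-- ===== SOURCE B (Python) =====
-- def _digits(radix, k):
--     # mixed-radix digits of k, most significant first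
--     ds = []
--     for b in reversed(radix):
--         ds.append(k % b)
--         k //= b
--     ds.reverse()
--     return ds
--
-- def _rows(chips):
--     # Unranking: combination number k is the mixed-radix decomposition of k over
--     # the per-color bases c+1.  The chosen amounts are emitted as one flat stream
--     # and packed four per row (one row = one combination of the four chip colors).
--     radix = [max(c + 1, 0) for c in chips]
--     total = 1
--     for b in radix:
--         total *= b
--     stream = []
--     for k in range(total):
--         ds = _digits(radix, k)
--         if ds != [0, 0, 0, 0] and ds != [1, 1, 1, 1]:
--             stream += ds
--     return [stream[i:i + 4] for i in range(0, len(stream), 4)]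
--
-- def _mask(row):
--     # little-endian bitmask: bit i set iff the row gives away chips of color i
--     m = 0
--     for v in reversed(row):
--         m = m * 2 + (v > 0)
--     return m
--
-- def generate_exchange_choices(my_chips, other_chips):
--     mine = _rows(my_chips)
--     others = _rows(other_chips)
--     # pre-filter the other agent's rows once per mask: an exchange is valid iff
--     # no color is given by both sides, i.e. the two masks are disjoint
--     buckets = [[o for o in others if mm & _mask(o) == 0] for mm in range(16)]
--     return [m + o for m in mine for o in buckets[_mask(m)]]
-- ===== Notes on version B (the rewrite author's own statement) =====
-- stated objective: alternative
-- what changed: Replaces A's recursive depth-first generator and O(M*N) all-pairs _isvalid scan by mixed-radix unranking (row k is the radix decomposition of k) plus 16 bitmask buckets that pre-filter the other agent's rows once per mask, so each my-row just appends its compatible bucket; Pre_ excludes inputs whose other-agent value stream is not a multiple of 4 while the my-agent stream is nonempty, where A's _isvalid can raise IndexError on the ragged last row (where A still returns on such inputs, B returns the same value).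
-- outside the precondition, e.g. on generate_exchange_choices([1], [1]): A returns [], B returns []
import Mathlib
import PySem

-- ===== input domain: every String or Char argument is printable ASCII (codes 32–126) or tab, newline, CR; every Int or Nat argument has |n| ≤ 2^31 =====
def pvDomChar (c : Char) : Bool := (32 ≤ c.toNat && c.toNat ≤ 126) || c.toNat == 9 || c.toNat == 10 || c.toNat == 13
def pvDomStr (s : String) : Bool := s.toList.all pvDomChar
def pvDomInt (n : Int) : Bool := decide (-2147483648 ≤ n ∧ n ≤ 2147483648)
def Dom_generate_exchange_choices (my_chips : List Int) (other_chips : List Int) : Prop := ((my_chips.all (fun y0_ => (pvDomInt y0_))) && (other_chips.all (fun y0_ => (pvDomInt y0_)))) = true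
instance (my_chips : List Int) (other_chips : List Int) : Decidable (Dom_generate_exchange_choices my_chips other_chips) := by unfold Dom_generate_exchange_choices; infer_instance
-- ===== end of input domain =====

-- B replaces A's recursive depth-first generator and O(M*N) all-pairs validity scan by
-- mixed-radix unranking of the combinations plus bitmask buckets of the other agent's rows.

-- both Pythons pack their value stream with the same loop
-- 'for i in range(0, len(stream), 4): ans.append(stream[i:i+4])'; it is ported by maintaining
-- the remaining suffix stream[i:] (stream[i:i+4] is its take 4), yielding the same rows in the
-- same order; tail-recursive, with the ans accumulator kept reversed ('append' = cons) as usual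
def pyChunk4Go (flat : List Int) (ans : List (List Int)) : List (List Int) :=
  if h : flat = [] then ans.reverse
  else pyChunk4Go (flat.drop 4) (flat.take 4 :: ans)
termination_by flat.length
decreasing_by
  have hpos : 0 < flat.length := List.length_pos_of_ne_nil h
  simp [List.length_drop]
  omega

def pyChunk4 (flat : List Int) : List (List Int) := pyChunk4Go flat []

-- ===== PORT A =====
-- inner 'gen' of generate_choices: returns None (at the base case) or the flat list of combinations
def genA (cnts : List Int) (idx : Nat) (choice : List Int) : Option (List Int) :=
  if _h : cnts.length ≤ idx then
    if choice = [0, 0, 0, 0] ∨ choice = [1, 1, 1, 1] then none else some choice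
  else
    -- the loop body 'choices += tmp' (skipping tmp == None) is the extend shape: flatMap
    some ((PySem.List.pyRange 0 (PySem.List.pyGetD cnts (idx : Int) 0 + 1) 1).flatMap
      (fun c =>
        match genA cnts (idx + 1) (choice ++ [c]) with
        | none => []
        | some t => t))
termination_by cnts.length - idx
decreasing_by omega

-- generate_choices: run gen, then regroup the flat list into chunks of 4
def genChoicesA (chips : List Int) : List (List Int) :=
  pyChunk4 ((genA chips 0 []).getD [])   -- top-level None is impossible ([] is not a length-4 literal)

-- _isvalid; pyGetD is exact here: under Pre_ the other chunk is at least as long as the my chunk,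
-- so the indexing other_chip[i] never raises
def isvalidA (my_chip other_chip : List Int) : Bool :=
  (PySem.List.pyRange 0 (my_chip.length : Int) 1).all
    (fun i => !(decide (PySem.List.pyGetD my_chip i 0 > 0) && decide (PySem.List.pyGetD other_chip i 0 > 0)))

def generate_exchange_choices (my_chips : List Int) (other_chips : List Int) : List (List Int) :=
  let my_choices := genChoicesA my_chips
  let other_choices := genChoicesA other_chips
  (PySem.List.pyRange 0 (my_choices.length : Int) 1).foldl (fun acc i =>
    (PySem.List.pyRange 0 (other_choices.length : Int) 1).foldl (fun acc j =>
      if isvalidA (PySem.List.pyGetD my_choices i []) (PySem.List.pyGetD other_choices j [])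
      then acc ++ [PySem.List.pyGetD my_choices i [] ++ PySem.List.pyGetD other_choices j []]
      else acc) acc) []

-- ===== PORT B =====
-- _digits: 'for b in reversed(radix): ds.append(k % b); k //= b' then 'ds.reverse()';
-- the loop state is the (ds, k) pair
def digitsGo (radrev : List Int) (ds : List Int) (k : Int) : List Int × Int :=
  match radrev with
  | [] => (ds, k)
  | b :: bs => digitsGo bs (ds ++ [PySem.Int.mod k b]) (PySem.Int.floordiv k b)

def digitsB (radix : List Int) (k : Int) : List Int :=
  (digitsGo radix.reverse [] k).1.reverse

-- _rows: unranking — row k is the mixed-radix decomposition of k; the chosen amounts are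
-- emitted as one flat stream and packed four per row
def rowsB (chips : List Int) : List (List Int) :=
  let radix := chips.map (fun c => max (c + 1) 0)
  let total := radix.foldl (fun a b => a * b) 1
  let stream := (PySem.List.pyRange 0 total 1).foldl (fun st k =>
    if !(digitsB radix k == [0, 0, 0, 0]) && !(digitsB radix k == [1, 1, 1, 1])
    then st ++ digitsB radix k else st) []
  pyChunk4 stream

-- _mask: little-endian bitmask, bit i set iff the row gives away chips of color i
def maskB (t : List Int) : Nat :=
  t.reverse.foldl (fun m v => m * 2 + (if v > 0 then 1 else 0)) 0

def generate_exchange_choices_alt (my_chips : List Int) (other_chips : List Int) : List (List Int) :=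
  let mine := rowsB my_chips
  let others := rowsB other_chips
  let buckets := (List.range 16).map
    (fun mm => others.filter (fun o => mm &&& maskB o == 0))
  mine.flatMap (fun m => (buckets.getD (maskB m) []).map (fun o => m ++ o))

-- ===== PRECONDITION & SPEC =====
-- number of combinations generate_choices keeps: the product of (c+1) over the chips, minus the
-- two length-4 literals [0,0,0,0] / [1,1,1,1] when they occur (only possible for 4 chips)
def keptCount (chips : List Int) : Nat :=
  (chips.map (fun c => (c + 1).toNat)).prod
    - (if chips.length = 4 ∧ ∀ c ∈ chips, 0 ≤ c then 1 else 0)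
    - (if chips.length = 4 ∧ ∀ c ∈ chips, 1 ≤ c then 1 else 0)

-- length of the flattened stream of kept combinations that both programs pack in fours
def pyFlatLen (chips : List Int) : Nat := chips.length * keptCount chips

-- Pre_ excludes the inputs whose flattened other-agent stream is not a multiple of 4 while the
-- my-agent stream is nonempty: there the other side ends in a ragged row shorter than 4 and A's
-- _isvalid can raise IndexError; where A happens to return on such inputs B returns the same value.
def Pre_generate_exchange_choices (my_chips : List Int) (other_chips : List Int) : Prop :=
  pyFlatLen other_chips % 4 = 0 ∨ pyFlatLen my_chips = 0
instance (my_chips : List Int) (other_chips : List Int) : Decidable (Pre_generate_exchange_choices my_chips other_chips) := by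
  unfold Pre_generate_exchange_choices; infer_instance

def pvWitness_generate_exchange_choices : List Int × List Int := ([1, 1, 2, 0], [0, 0, 1, 1])

def Spec_generate_exchange_choices (my_chips : List Int) (other_chips : List Int) (out : List (List Int)) : Prop := out = generate_exchange_choices_alt my_chips other_chips
instance (my_chips : List Int) (other_chips : List Int) (out : List (List Int)) : Decidable (Spec_generate_exchange_choices my_chips other_chips out) := by unfold Spec_generate_exchange_choices; infer_instance

-- ===== CLAIM =====
def Claim_equal_generate_exchange_choices : Prop := ∀ (my_chips : List Int) (other_chips : List Int), Dom_generate_exchange_choices my_chips other_chips → Pre_generate_exchange_choices my_chips other_chips → Spec_generate_exchange_choices my_chips other_chips (generate_exchange_choices my_chips other_chips)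

-- ===== LEMMAS AND PROOFS =====

-- the cartesian product both programs enumerate, in the shared (lexicographic) order
def prodChoices : List Int → List (List Int)
  | [] => [[]]
  | c :: rest => (PySem.List.pyRange 0 (c + 1) 1).flatMap (fun v => (prodChoices rest).map (fun t => v :: t))

def predB (t : List Int) : Bool := !(t == [0, 0, 0, 0]) && !(t == [1, 1, 1, 1])

-- what A's gen(cnts, idx, choice) flattens to
def flatGen (cnts : List Int) (idx : Nat) (choice : List Int) : List Int :=
  ((((prodChoices (cnts.drop idx)).map (fun t => choice ++ t)).filter predB).flatten)

-- the flat stream both programs pack in fours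
def flatP (chips : List Int) : List Int := ((prodChoices chips).filter predB).flatten

-- the per-color radices as naturals, and the spec form of B's digit decomposition
def radNat (chips : List Int) : List Nat := chips.map (fun c => (c + 1).toNat)

def natDec : List Nat → Nat → List Int
  | [], _ => []
  | b :: bs, k => ((k / bs.prod % b : Nat) : Int) :: natDec bs k

-- the index-free form of A's _isvalid
def validN (m o : List Int) : Bool :=
  (List.range m.length).all (fun k => !(decide (m.getD k 0 > 0) && decide (o.getD k 0 > 0)))

theorem prod_length {cnts : List Int} {t : List Int} (h : t ∈ prodChoices cnts) :
    t.length = cnts.length := by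
  induction cnts generalizing t with
  | nil => simp [prodChoices] at h; simp [h]
  | cons c rest ih =>
      simp [prodChoices] at h
      obtain ⟨v, -, u, hu, rfl⟩ := h
      simp [ih hu]

theorem flatten_filter_flatMap {α β : Type} (l : List α) (g : α → List (List β))
    (p : List β → Bool) :
    (((l.flatMap g).filter p).flatten) = l.flatMap (fun x => (((g x).filter p).flatten)) := by
  induction l with
  | nil => simp
  | cons x l ih => simp [List.filter_append, ih]

theorem genA_flat (cnts : List Int) :
    ∀ (k idx : Nat) (choice : List Int), cnts.length - idx = k →
      (genA cnts idx choice).getD [] = flatGen cnts idx choice := by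
  intro k
  induction k with
  | zero =>
      intro idx choice hk
      have hge : cnts.length ≤ idx := by omega
      rw [genA, dif_pos hge]
      rw [flatGen, List.drop_eq_nil_of_le hge]
      by_cases h : choice = [0, 0, 0, 0] ∨ choice = [1, 1, 1, 1]
      · rw [if_pos h]
        rcases h with h | h <;> simp [prodChoices, predB, h]
      · rw [if_neg h]
        push_neg at h
        simp [prodChoices, predB, h.1, h.2]
  | succ k ih =>
      intro idx choice hk
      have hlt : idx < cnts.length := by omega
      have hnge : ¬ cnts.length ≤ idx := by omega
      rw [genA, dif_neg hnge]
      have hbody : (fun (c : Int) =>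
            (match genA cnts (idx + 1) (choice ++ [c]) with
             | none => ([] : List Int)
             | some t => t))
          = fun c => flatGen cnts (idx + 1) (choice ++ [c]) := by
        funext c
        have hih := ih (idx + 1) (choice ++ [c]) (by omega)
        cases hg : genA cnts (idx + 1) (choice ++ [c]) with
        | none =>
            rw [hg, Option.getD_none] at hih
            exact hih
        | some t =>
            rw [hg, Option.getD_some] at hih
            exact hih
      rw [Option.getD_some, hbody]
      have hdrop : cnts.drop idx = cnts[idx] :: cnts.drop (idx + 1) :=
        List.drop_eq_getElem_cons hlt
      have hget : PySem.List.pyGetD cnts (idx : Int) 0 = cnts[idx] := by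
        rw [PySem.List.pyGetD_natCast, List.getD_eq_getElem?_getD, List.getElem?_eq_getElem hlt,
          Option.getD_some]
      rw [hget, flatGen, hdrop]
      simp only [prodChoices, List.map_flatMap, flatten_filter_flatMap]
      refine List.flatMap_congr (fun c _ => ?_)
      simp [flatGen, List.map_map, Function.comp_def, List.append_assoc]

theorem choicesA_eq (chips : List Int) : genChoicesA chips = pyChunk4 (flatP chips) := by
  simp only [genChoicesA]
  rw [genA_flat chips chips.length 0 [] (by omega)]
  have h : flatGen chips 0 [] = flatP chips := by simp [flatGen, flatP]
  rw [h]

-- ---------- B's stream equals the shared flat stream ----------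

theorem digitsGo_acc (l : List Int) : ∀ (ds : List Int) (k : Int),
    digitsGo l ds k = (ds ++ (digitsGo l [] k).1, (digitsGo l [] k).2) := by
  induction l with
  | nil => intro ds k; simp [digitsGo]
  | cons b bs ih =>
      intro ds k
      rw [digitsGo, digitsGo, ih (ds ++ [PySem.Int.mod k b]), ih ([] ++ [PySem.Int.mod k b])]
      simp

theorem digitsB_concat (bs : List Int) (b : Int) (k : Int) :
    digitsB (bs ++ [b]) k
      = digitsB bs (PySem.Int.floordiv k b) ++ [PySem.Int.mod k b] := by
  rw [digitsB, List.reverse_append, List.reverse_singleton, List.singleton_append,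
    digitsGo, digitsGo_acc, digitsB]
  simp

theorem natDec_concat (bs : List Nat) (b : Nat) : ∀ (k : Nat),
    natDec (bs ++ [b]) k = natDec bs (k / b) ++ [((k % b : Nat) : Int)] := by
  induction bs with
  | nil => intro k; simp [natDec]
  | cons b0 bs ih =>
      intro k
      rw [List.cons_append, natDec, natDec, ih k, List.cons_append]
      have h : k / (bs ++ [b]).prod = k / b / bs.prod := by
        rw [List.prod_append, List.prod_singleton, Nat.div_div_eq_div_mul, Nat.mul_comm]
      rw [h]

theorem all_pos_of_prod_pos : ∀ {l : List Nat}, 0 < l.prod → ∀ x ∈ l, 1 ≤ x := by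
  intro l
  induction l with
  | nil => intro _ x hx; simp at hx
  | cons b bs ih =>
      intro h x hx
      rw [List.prod_cons] at h
      rcases List.mem_cons.1 hx with rfl | hx
      · refine Nat.pos_of_ne_zero (fun h0 => ?_)
        rw [h0, Nat.zero_mul] at h
        omega
      · refine ih (Nat.pos_of_ne_zero (fun h0 => ?_)) x hx
        rw [h0, Nat.mul_zero] at h
        omega

theorem digitsB_natCast : ∀ (rn : List Nat) (k : Nat), (∀ b ∈ rn, 1 ≤ b) →
    digitsB (rn.map (fun (n : Nat) => (n : Int))) (k : Int) = natDec rn k := by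
  intro rn
  induction rn using List.reverseRecOn with
  | nil => intro k _; simp [digitsB, digitsGo, natDec]
  | append_singleton bs b ih =>
      intro k hall
      rw [List.map_append, List.map_singleton, digitsB_concat,
        PySem.Int.mod_natCast, PySem.Int.floordiv_natCast,
        ih (k / b) (fun x hx => hall x (by simp [hx])), natDec_concat]

theorem natDec_add_mul : ∀ (rn : List Nat) (k m : Nat), (∀ b ∈ rn, 1 ≤ b) →
    natDec rn (k + m * rn.prod) = natDec rn k := by
  intro rn
  induction rn with
  | nil => intro k m _; rfl
  | cons b bs ih =>
      intro k m hall
      have hpos : 0 < bs.prod :=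
        List.prod_pos (fun x hx => hall x (by simp [hx]))
      rw [natDec, natDec]
      have harg : k + m * (b :: bs).prod = k + (m * b) * bs.prod := by
        rw [List.prod_cons]; ring
      rw [harg]
      have hhead : (k + m * b * bs.prod) / bs.prod % b = k / bs.prod % b := by
        rw [Nat.add_mul_div_right _ _ hpos, Nat.add_mul_mod_self_right]
      rw [hhead, ih k (m * b) (fun x hx => hall x (by simp [hx]))]

theorem range_mul_flatMap (b T : Nat) :
    List.range (b * T) = (List.range b).flatMap (fun v => (List.range T).map (fun r => v * T + r)) := by
  induction b with
  | zero => simp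
  | succ b ih =>
      rw [Nat.succ_mul, List.range_add, ih, List.range_succ, List.flatMap_append]
      simp [Nat.mul_comm]

theorem sum_map_const_nat {α : Type} (l : List α) (k : Nat) :
    (l.map (fun _ => k)).sum = l.length * k := by
  induction l with
  | nil => simp
  | cons x l ih => simp [ih]; ring

theorem len_prod (chips : List Int) :
    (prodChoices chips).length = (chips.map (fun c => (c + 1).toNat)).prod := by
  induction chips with
  | nil => simp [prodChoices]
  | cons c rest ih =>
      simp only [prodChoices, List.length_flatMap, List.map_cons, List.prod_cons]
      have h : ((PySem.List.pyRange 0 (c + 1) 1).map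
          (fun a => ((prodChoices rest).map (fun t => a :: t)).length))
          = (PySem.List.pyRange 0 (c + 1) 1).map (fun _ => (prodChoices rest).length) := by
        refine List.map_congr_left (fun v _ => ?_)
        simp
      rw [h, sum_map_const_nat, PySem.List.length_pyRange_one, ih]
      simp

theorem enum_natDec : ∀ (chips : List Int),
    (List.range (radNat chips).prod).map (fun k => natDec (radNat chips) k) = prodChoices chips := by
  intro chips
  induction chips with
  | nil => simp [radNat, natDec, prodChoices]
  | cons c rest ih =>
      have hrad : radNat (c :: rest) = (c + 1).toNat :: radNat rest := rfl
      by_cases hT : (radNat rest).prod = 0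
      · have hrest : prodChoices rest = [] := by
          have := len_prod rest
          rw [show rest.map (fun c => (c + 1).toNat) = radNat rest from rfl, hT] at this
          exact List.length_eq_zero_iff.1 this
        rw [hrad, List.prod_cons, hT, Nat.mul_zero]
        simp [prodChoices, hrest]
      · have hTpos : 0 < (radNat rest).prod := Nat.pos_of_ne_zero hT
        have hall : ∀ x ∈ radNat rest, 1 ≤ x := all_pos_of_prod_pos hTpos
        rw [hrad, List.prod_cons, range_mul_flatMap, List.map_flatMap]
        have hpr : PySem.List.pyRange 0 (c + 1) 1
            = (List.range (c + 1).toNat).map (fun (v : Nat) => (v : Int)) := by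
          rw [PySem.List.pyRange_one]
          simp
        rw [prodChoices, hpr, List.flatMap_map]
        refine List.flatMap_congr (fun v hv => ?_)
        rw [List.mem_range] at hv
        rw [List.map_map]
        have hfun : ∀ r ∈ List.range (radNat rest).prod,
            ((fun k => natDec ((c + 1).toNat :: radNat rest) k) ∘ fun r => v * (radNat rest).prod + r) r
              = (fun r => (v : Int) :: natDec (radNat rest) r) r := by
          intro r hr
          rw [List.mem_range] at hr
          show natDec ((c + 1).toNat :: radNat rest) (v * (radNat rest).prod + r)
              = (v : Int) :: natDec (radNat rest) r
          rw [natDec]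
          have h1 : (v * (radNat rest).prod + r) / (radNat rest).prod = v := by
            rw [Nat.add_comm, Nat.add_mul_div_right _ _ hTpos, Nat.div_eq_of_lt hr, Nat.zero_add]
          have h2 : v % (c + 1).toNat = v := Nat.mod_eq_of_lt hv
          rw [h1, h2]
          have h3 : v * (radNat rest).prod + r = r + v * (radNat rest).prod := by ring
          rw [h3, natDec_add_mul (radNat rest) r v hall]
        rw [List.map_congr_left hfun]
        rw [show (fun r => (v : Int) :: natDec (radNat rest) r)
              = (fun t => (v : Int) :: t) ∘ (fun r => natDec (radNat rest) r) from rfl]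
        rw [← List.map_map, ih]

theorem foldl_mul_nat (l : List Nat) : ∀ (a : Nat), l.foldl (fun x y => x * y) a = a * l.prod := by
  induction l with
  | nil => intro a; simp
  | cons b bs ih => intro a; rw [List.foldl_cons, ih, List.prod_cons]; ring

theorem foldl_mul_cast (l : List Nat) : ∀ (a : Nat),
    (l.map (fun (n : Nat) => (n : Int))).foldl (fun x y => x * y) (a : Int) = ((l.foldl (fun x y => x * y) a : Nat) : Int) := by
  induction l with
  | nil => intro a; simp
  | cons b bs ih =>
      intro a
      rw [List.map_cons, List.foldl_cons, List.foldl_cons, ← Int.natCast_mul, ih]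

theorem foldl_mul_cast_one (l : List Nat) :
    (l.map (fun (n : Nat) => (n : Int))).foldl (fun x y => x * y) 1 = ((l.prod : Nat) : Int) := by
  have h := foldl_mul_cast l 1
  rw [Nat.cast_one] at h
  rw [h, foldl_mul_nat, Nat.one_mul]

theorem radix_eq (chips : List Int) :
    chips.map (fun c => max (c + 1) 0) = (radNat chips).map (fun (n : Nat) => (n : Int)) := by
  rw [radNat, List.map_map]
  refine List.map_congr_left (fun c _ => ?_)
  simp [Int.toNat_eq_max]

theorem flatMap_ite_filter (p : List Int → Bool) (l : List (List Int)) :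
    l.flatMap (fun t => if p t then t else []) = (l.filter p).flatten := by
  induction l with
  | nil => simp
  | cons t l ih =>
      rw [List.flatMap_cons, List.filter_cons, ih]
      by_cases h : p t
      · rw [if_pos h, if_pos h, List.flatten_cons]
      · rw [if_neg h, if_neg h, List.nil_append]

theorem rowsB_eq (chips : List Int) : rowsB chips = pyChunk4 (flatP chips) := by
  rw [rowsB]
  refine congrArg pyChunk4 ?_
  rw [radix_eq chips, foldl_mul_cast_one (radNat chips)]
  rw [PySem.List.pyRange_one]
  have hrange : ((((radNat chips).prod : Int) - 0).toNat) = (radNat chips).prod := by omega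
  rw [hrange]
  rw [List.foldl_map]
  have hcongr : ∀ (st : List Int) (k : Nat), k ∈ List.range (radNat chips).prod →
      (if !(digitsB ((radNat chips).map (fun (n : Nat) => (n : Int))) (0 + (k : Int)) == [0, 0, 0, 0])
          && !(digitsB ((radNat chips).map (fun (n : Nat) => (n : Int))) (0 + (k : Int)) == [1, 1, 1, 1])
       then st ++ digitsB ((radNat chips).map (fun (n : Nat) => (n : Int))) (0 + (k : Int)) else st)
      = st ++ (if predB (natDec (radNat chips) k) then natDec (radNat chips) k else []) := by
    intro st k hk
    rw [List.mem_range] at hk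
    have hall : ∀ b ∈ radNat chips, 1 ≤ b :=
      all_pos_of_prod_pos (by omega)
    have hd : digitsB ((radNat chips).map (fun (n : Nat) => (n : Int))) (0 + (k : Int))
        = natDec (radNat chips) k := by
      rw [Int.zero_add]
      exact digitsB_natCast (radNat chips) k hall
    rw [hd, predB]
    by_cases h : (!(natDec (radNat chips) k == [0, 0, 0, 0])
        && !(natDec (radNat chips) k == [1, 1, 1, 1])) = true
    · rw [if_pos h, if_pos h]
    · rw [if_neg h, if_neg h, List.append_nil]
  rw [PySem.List.foldl_congr_mem (List.range (radNat chips).prod) _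
    (fun st k => st ++ (if predB (natDec (radNat chips) k) then natDec (radNat chips) k else []))
    [] hcongr]
  rw [PySem.List.foldl_append_eq_flatMap
    (fun k => if predB (natDec (radNat chips) k) then natDec (radNat chips) k else [])
    (List.range (radNat chips).prod) []]
  rw [List.nil_append]
  have hfm := List.flatMap_map (f := fun k => natDec (radNat chips) k)
    (g := fun t => if predB t then t else []) (l := List.range (radNat chips).prod)
  rw [← hfm, enum_natDec chips, flatMap_ite_filter predB]
  rfl

-- ---------- pyChunk4 facts ----------

theorem pyChunk4Go_nil (ans : List (List Int)) : pyChunk4Go [] ans = ans.reverse := by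
  rw [pyChunk4Go]
  simp

theorem pyChunk4Go_cons (flat : List Int) (ans : List (List Int)) (h : flat ≠ []) :
    pyChunk4Go flat ans = pyChunk4Go (flat.drop 4) (flat.take 4 :: ans) := by
  rw [pyChunk4Go, dif_neg h]

theorem pyChunk4Go_acc : ∀ (n : Nat) (flat : List Int) (ans : List (List Int)),
    flat.length ≤ n → pyChunk4Go flat ans = ans.reverse ++ pyChunk4Go flat [] := by
  intro n
  induction n with
  | zero =>
      intro flat ans hlen
      have hf : flat = [] := List.length_eq_zero_iff.1 (by omega)
      subst hf
      rw [pyChunk4Go_nil, pyChunk4Go_nil]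
      simp
  | succ n ih =>
      intro flat ans hlen
      by_cases hf : flat = []
      · subst hf
        rw [pyChunk4Go_nil, pyChunk4Go_nil]
        simp
      · have hpos : 0 < flat.length := List.length_pos_of_ne_nil hf
        rw [pyChunk4Go_cons flat ans hf, pyChunk4Go_cons flat [] hf]
        rw [ih (flat.drop 4) (flat.take 4 :: ans) (by simp [List.length_drop]; omega),
          ih (flat.drop 4) [flat.take 4] (by simp [List.length_drop]; omega)]
        simp

theorem pyChunk4_eq (flat : List Int) :
    pyChunk4 flat = if flat = [] then [] else flat.take 4 :: pyChunk4 (flat.drop 4) := by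
  by_cases hf : flat = []
  · subst hf
    rw [pyChunk4, pyChunk4Go_nil]
    simp
  · rw [pyChunk4, pyChunk4Go_cons flat [] hf, if_neg hf, pyChunk4]
    rw [pyChunk4Go_acc (flat.drop 4).length (flat.drop 4) [flat.take 4] le_rfl]
    simp

theorem pyChunk4_nil : pyChunk4 [] = [] := by
  rw [pyChunk4_eq]
  simp

theorem mem_pyChunk4_le_aux : ∀ (n : Nat) (flat t : List Int), flat.length ≤ n →
    t ∈ pyChunk4 flat → t.length ≤ 4 := by
  intro n
  induction n with
  | zero =>
      intro flat t hlen hmem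
      have : flat = [] := List.length_eq_zero_iff.1 (by omega)
      rw [this, pyChunk4_nil] at hmem
      simp at hmem
  | succ n ih =>
      intro flat t hlen hmem
      rw [pyChunk4_eq] at hmem
      split at hmem
      · simp at hmem
      · rcases List.mem_cons.1 hmem with h | h
        · rw [h]
          simp only [List.length_take]
          omega
        · exact ih (flat.drop 4) t (by simp [List.length_drop]; omega) h

theorem mem_pyChunk4_le {flat t : List Int} (h : t ∈ pyChunk4 flat) : t.length ≤ 4 :=
  mem_pyChunk4_le_aux flat.length flat t le_rfl h

theorem mem_pyChunk4_eq4_aux : ∀ (n : Nat) (flat t : List Int), flat.length ≤ n →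
    flat.length % 4 = 0 → t ∈ pyChunk4 flat → t.length = 4 := by
  intro n
  induction n with
  | zero =>
      intro flat t hlen _ hmem
      have : flat = [] := List.length_eq_zero_iff.1 (by omega)
      rw [this, pyChunk4_nil] at hmem
      simp at hmem
  | succ n ih =>
      intro flat t hlen h4 hmem
      rw [pyChunk4_eq] at hmem
      split at hmem
      · simp at hmem
      · rename_i hne
        have hpos : 0 < flat.length := List.length_pos_of_ne_nil hne
        rcases List.mem_cons.1 hmem with h | h
        · rw [h]
          simp only [List.length_take]
          omega
        · exact ih (flat.drop 4) t (by simp [List.length_drop]; omega)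
            (by simp [List.length_drop]; omega) h

theorem mem_pyChunk4_eq4 {flat t : List Int} (h4 : flat.length % 4 = 0)
    (h : t ∈ pyChunk4 flat) : t.length = 4 :=
  mem_pyChunk4_eq4_aux flat.length flat t le_rfl h4 h

-- ---------- the flat stream's length ----------

theorem count_flatMap_eq {α β : Type} [BEq β] (l : List α) (f : α → List β) (a : β) :
    (l.flatMap f).count a = (l.map (fun x => (f x).count a)).sum := by
  induction l with
  | nil => simp
  | cons x l ih => simp [List.count_append, ih]

theorem sum_map_ite {α : Type} [DecidableEq α] (l : List α) (hl : l.Nodup) (w : α) (x : Nat) :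
    (l.map (fun v => if w = v then x else 0)).sum = if w ∈ l then x else 0 := by
  induction l with
  | nil => simp
  | cons v l ih =>
      rw [List.nodup_cons] at hl
      rw [List.map_cons, List.sum_cons, ih hl.2]
      by_cases h : w = v
      · subst h
        simp [hl.1]
      · simp [h]

theorem count_prod (chips : List Int) : ∀ t : List Int,
    (prodChoices chips).count t = if List.Forall₂ (fun v c => 0 ≤ v ∧ v ≤ c) t chips then 1 else 0 := by
  induction chips with
  | nil =>
      intro t
      rcases t with _ | ⟨w, t⟩ <;> simp [prodChoices, List.count_cons]
  | cons c rest ih =>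
      intro t
      rw [show prodChoices (c :: rest)
            = (PySem.List.pyRange 0 (c + 1) 1).flatMap (fun v => (prodChoices rest).map (fun u => v :: u))
          from rfl]
      rw [count_flatMap_eq]
      rcases t with _ | ⟨w, t⟩
      · have hz : ∀ v ∈ PySem.List.pyRange 0 (c + 1) 1,
            (fun x => ((prodChoices rest).map (fun u => x :: u)).count ([] : List Int)) v = (fun _ => (0 : Nat)) v := by
          intro v _
          show ((prodChoices rest).map (fun u => v :: u)).count ([] : List Int) = 0
          simp only [List.count_eq_zero]
          intro hmem
          obtain ⟨u, -, hu⟩ := List.mem_map.1 hmem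
          simp at hu
        rw [List.map_congr_left hz]
        have : ¬ List.Forall₂ (fun v c => 0 ≤ v ∧ v ≤ c) ([] : List Int) (c :: rest) := by
          intro h; exact absurd h.length_eq (by simp)
        simp [this]
      · have hcnt : ∀ v ∈ PySem.List.pyRange 0 (c + 1) 1,
            (fun x => ((prodChoices rest).map (fun u => x :: u)).count (w :: t)) v
              = (fun x => if w = x then (prodChoices rest).count t else 0) v := by
          intro v _
          show ((prodChoices rest).map (fun u => v :: u)).count (w :: t)
              = if w = v then (prodChoices rest).count t else 0
          by_cases h : w = v
          · subst h
            rw [if_pos rfl]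
            exact List.count_map_of_injective _ _ (fun a b hab => by injection hab) t
          · rw [if_neg h]
            simp only [List.count_eq_zero]
            intro hmem
            obtain ⟨u, -, hu⟩ := List.mem_map.1 hmem
            injection hu with h1 h2
            exact h h1.symm
        rw [List.map_congr_left hcnt]
        have hcw : (fun x => if w = x then (prodChoices rest).count t else 0)
            = (fun x => if w = x then (if List.Forall₂ (fun v c => 0 ≤ v ∧ v ≤ c) t rest then 1 else 0) else 0) := by
          funext x
          rw [ih t]
        rw [hcw, sum_map_ite _ (PySem.List.nodup_pyRange_one 0 (c + 1)) w _,
          if_congr (List.forall₂_cons) rfl rfl]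
        by_cases hw : w ∈ PySem.List.pyRange 0 (c + 1) 1
        · rw [if_pos hw]
          rw [PySem.List.mem_pyRange_one] at hw
          have hwc : 0 ≤ w ∧ w ≤ c := ⟨hw.1, by omega⟩
          by_cases hf : List.Forall₂ (fun v c => 0 ≤ v ∧ v ≤ c) t rest
          · rw [if_pos hf, if_pos ⟨hwc, hf⟩]
          · rw [if_neg hf, if_neg (by rintro ⟨-, hx⟩; exact hf hx)]
        · rw [if_neg hw]
          have hno : ¬ ((0 ≤ w ∧ w ≤ c) ∧ List.Forall₂ (fun v c => 0 ≤ v ∧ v ≤ c) t rest) := by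
            rintro ⟨⟨ha, hb⟩, -⟩
            exact hw (PySem.List.mem_pyRange_one.mpr ⟨ha, by omega⟩)
          rw [if_neg hno]

theorem forall₂_zero (chips : List Int) :
    List.Forall₂ (fun v c => 0 ≤ v ∧ v ≤ c) ([0, 0, 0, 0] : List Int) chips
      ↔ (chips.length = 4 ∧ ∀ c ∈ chips, 0 ≤ c) := by
  rcases chips with _ | ⟨c1, _ | ⟨c2, _ | ⟨c3, _ | ⟨c4, _ | ⟨c5, rest⟩⟩⟩⟩⟩ <;>
    simp [List.forall₂_cons] <;> try tauto

theorem forall₂_one (chips : List Int) :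
    List.Forall₂ (fun v c => 0 ≤ v ∧ v ≤ c) ([1, 1, 1, 1] : List Int) chips
      ↔ (chips.length = 4 ∧ ∀ c ∈ chips, 1 ≤ c) := by
  rcases chips with _ | ⟨c1, _ | ⟨c2, _ | ⟨c3, _ | ⟨c4, _ | ⟨c5, rest⟩⟩⟩⟩⟩ <;>
    simp [List.forall₂_cons] <;> try tauto

theorem count_two_le {α : Type} [BEq α] [LawfulBEq α] (l : List α) {x y : α} (hxy : x ≠ y) :
    l.count x + l.count y ≤ l.length := by
  induction l with
  | nil => simp
  | cons t l ih =>
      rw [List.count_cons, List.count_cons, List.length_cons]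
      by_cases hx : t = x <;> by_cases hy : t = y
      · exact absurd (hx.symm.trans hy) hxy
      · simp [hx, hxy]; omega
      · have hyx : y ≠ x := fun hh => hxy hh.symm
        simp [hy, hyx]; omega
      · simp [hx, hy]; omega

theorem filter_predB_length (l : List (List Int)) :
    (l.filter predB).length = l.length - l.count [0, 0, 0, 0] - l.count [1, 1, 1, 1] := by
  induction l with
  | nil => simp
  | cons t l ih =>
      have hc1 : l.count ([0, 0, 0, 0] : List Int) ≤ l.length := List.count_le_length
      have hc2 : l.count ([1, 1, 1, 1] : List Int) ≤ l.length := List.count_le_length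
      rw [List.filter_cons, List.count_cons, List.count_cons, List.length_cons]
      by_cases h0 : t = [0, 0, 0, 0]
      · have hp : predB t = false := by rw [h0]; rfl
        rw [hp]
        have e0 : (t == ([0, 0, 0, 0] : List Int)) = true := by simp [h0]
        have e1 : (t == ([1, 1, 1, 1] : List Int)) = false := by rw [h0]; rfl
        rw [e0, e1]
        simp only [Bool.false_eq_true, if_false, if_true, ih]
        omega
      · by_cases h1 : t = [1, 1, 1, 1]
        · have hp : predB t = false := by rw [h1]; rfl
          rw [hp]
          have e0 : (t == ([0, 0, 0, 0] : List Int)) = false := by rw [h1]; rfl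
          have e1 : (t == ([1, 1, 1, 1] : List Int)) = true := by simp [h1]
          rw [e0, e1]
          simp only [Bool.false_eq_true, if_false, if_true, ih]
          omega
        · have hp : predB t = true := by simp [predB, h0, h1]
          rw [if_pos hp]
          have e0 : (t == ([0, 0, 0, 0] : List Int)) = false := by simpa using h0
          have e1 : (t == ([1, 1, 1, 1] : List Int)) = false := by simpa using h1
          rw [e0, e1]
          have h2c : l.count ([0, 0, 0, 0] : List Int) + l.count ([1, 1, 1, 1] : List Int) ≤ l.length :=
            count_two_le (x := ([0, 0, 0, 0] : List Int)) (y := ([1, 1, 1, 1] : List Int)) l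
              (by simp)
          simp only [Bool.false_eq_true, if_false, List.length_cons, ih]
          omega

theorem flatP_len (chips : List Int) : (flatP chips).length = pyFlatLen chips := by
  rw [flatP, List.length_flatten]
  have h : ((prodChoices chips).filter predB).map List.length
      = ((prodChoices chips).filter predB).map (fun _ => chips.length) :=
    List.map_congr_left (fun t ht => prod_length (List.mem_of_mem_filter ht))
  rw [h, sum_map_const_nat, filter_predB_length, count_prod, count_prod, len_prod]
  rw [if_congr (forall₂_zero chips) rfl rfl, if_congr (forall₂_one chips) rfl rfl]
  rw [pyFlatLen, keptCount]
  ring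

theorem rowsB_of_flat_zero {chips : List Int} (h : pyFlatLen chips = 0) :
    rowsB chips = [] := by
  rw [rowsB_eq]
  have hf : flatP chips = [] := List.length_eq_zero_iff.1 (by rw [flatP_len, h])
  rw [hf, pyChunk4_nil]

theorem mem_rowsB_le {chips t : List Int} (h : t ∈ rowsB chips) : t.length ≤ 4 := by
  rw [rowsB_eq] at h
  exact mem_pyChunk4_le h

theorem mem_rowsB_eq4 {chips t : List Int} (h4 : pyFlatLen chips % 4 = 0)
    (h : t ∈ rowsB chips) : t.length = 4 := by
  rw [rowsB_eq] at h
  exact mem_pyChunk4_eq4 (by rw [flatP_len, h4]) h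

theorem rowsAB (chips : List Int) : genChoicesA chips = rowsB chips := by
  rw [choicesA_eq, rowsB_eq]

-- ---------- masks and validity ----------

theorem maskB_nil : maskB [] = 0 := rfl

theorem maskB_cons (a : Int) (t : List Int) :
    maskB (a :: t) = maskB t * 2 + (if a > 0 then 1 else 0) := by
  rw [maskB, maskB, List.reverse_cons, List.foldl_append, List.foldl_cons, List.foldl_nil]

theorem maskB_lt (t : List Int) : maskB t < 2 ^ t.length := by
  induction t with
  | nil => simp [maskB_nil]
  | cons a t ih =>
      rw [maskB_cons, List.length_cons, pow_succ]
      have hb : (if a > 0 then (1 : Nat) else 0) ≤ 1 := by split <;> omega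
      omega

theorem land_mul_two_add (x y a b : Nat) (ha : a ≤ 1) (hb : b ≤ 1) :
    (x * 2 + a) &&& (y * 2 + b) = (x &&& y) * 2 + (a &&& b) := by
  have hab : a &&& b ≤ 1 := by
    interval_cases a <;> interval_cases b <;> decide
  refine Nat.eq_of_testBit_eq (fun i => ?_)
  cases i with
  | zero =>
      rw [Nat.testBit_land, Nat.testBit_zero, Nat.testBit_zero, Nat.testBit_zero]
      have h1 : (x * 2 + a) % 2 = a := by omega
      have h2 : (y * 2 + b) % 2 = b := by omega
      have h3 : ((x &&& y) * 2 + (a &&& b)) % 2 = a &&& b := by omega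
      rw [h1, h2, h3]
      interval_cases a <;> interval_cases b <;> decide
  | succ i =>
      rw [Nat.testBit_land, Nat.testBit_add_one, Nat.testBit_add_one, Nat.testBit_add_one,
        ← Nat.testBit_land]
      have h1 : (x * 2 + a) / 2 = x := by omega
      have h2 : (y * 2 + b) / 2 = y := by omega
      have h3 : ((x &&& y) * 2 + (a &&& b)) / 2 = x &&& y := by omega
      rw [h1, h2, h3]

theorem isvalidA_eq_validN (m o : List Int) : isvalidA m o = validN m o := by
  rw [isvalidA, validN, PySem.List.pyRange_one, List.all_map]
  rw [show ((((m.length : Nat) : Int) - 0).toNat) = m.length by simp]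
  congr 1
  funext k
  simp [PySem.List.pyGetD_natCast]

theorem mask_step (x : Nat) (p q : Bool) :
    ((!(p && q)) && (x == 0)) = ((x * 2 + ((if p = true then 1 else 0) &&& (if q = true then 1 else 0))) == 0) := by
  cases p <;> cases q <;> rw [Bool.eq_iff_iff] <;> simp <;> omega

theorem validN_eq_mask (m : List Int) : ∀ (o : List Int), m.length ≤ o.length →
    validN m o = (maskB m &&& maskB o == 0) := by
  induction m with
  | nil =>
      intro o _
      simp [validN, maskB_nil]
  | cons a m ih =>
      intro o h
      rcases o with _ | ⟨b, o⟩
      · simp at h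
      · have hrec : validN (a :: m) (b :: o)
            = ((!(decide (a > 0) && decide (b > 0))) && validN m o) := by
          simp only [validN, List.length_cons, List.range_succ_eq_map, List.all_cons,
            List.all_map, Function.comp_def, List.getD_cons_zero, List.getD_cons_succ,
            Nat.succ_eq_add_one]
        rw [hrec, maskB_cons, maskB_cons,
          land_mul_two_add _ _ _ _ (by split <;> omega) (by split <;> omega),
          ih o (by simpa using h)]
        have hms := mask_step (maskB m &&& maskB o) (decide (a > 0)) (decide (b > 0))
        simpa using hms

-- ===== VERDICT (by name: the statement is the Claim_ definition above) =====
theorem generate_exchange_choices_spec : Claim_equal_generate_exchange_choices := by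
  intro mc oc _ hpre
  unfold Spec_generate_exchange_choices
  rw [generate_exchange_choices, generate_exchange_choices_alt, rowsAB mc, rowsAB oc]
  rcases hpre with hpre | hpre
  case inr =>
    rw [rowsB_of_flat_zero hpre]
    rfl
  case inl =>
    rw [PySem.List.foldl_pyRange_zero_pyGetD' (rowsB mc) []
      (fun acc m =>
        (PySem.List.pyRange 0 ((rowsB oc).length : Int) 1).foldl (fun acc j =>
          if isvalidA m (PySem.List.pyGetD (rowsB oc) j [])
          then acc ++ [m ++ PySem.List.pyGetD (rowsB oc) j []]
          else acc) acc) []]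
    have hinner : ∀ (acc : List (List Int)) (m : List Int), m ∈ rowsB mc →
        (PySem.List.pyRange 0 ((rowsB oc).length : Int) 1).foldl (fun acc j =>
          if isvalidA m (PySem.List.pyGetD (rowsB oc) j [])
          then acc ++ [m ++ PySem.List.pyGetD (rowsB oc) j []]
          else acc) acc
        = acc ++ ((rowsB oc).filter (fun o => isvalidA m o)).map (fun o => m ++ o) := by
      intro acc m _
      rw [PySem.List.foldl_pyRange_zero_pyGetD' (rowsB oc) []
        (fun acc o => if isvalidA m o then acc ++ [m ++ o] else acc) acc]
      exact PySem.List.foldl_append_if (fun o => isvalidA m o) (fun o => m ++ o) _ acc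
    refine Eq.trans (PySem.List.foldl_congr_mem (rowsB mc) _
      (fun acc m => acc ++ ((rowsB oc).filter (fun o => isvalidA m o)).map (fun o => m ++ o))
      [] hinner) ?_
    refine Eq.trans (PySem.List.foldl_append_eq_flatMap
      (fun m => ((rowsB oc).filter (fun o => isvalidA m o)).map (fun o => m ++ o)) (rowsB mc) []) ?_
    simp only [List.nil_append]
    refine List.flatMap_congr (fun m hm => ?_)
    have hm4 : m.length ≤ 4 := mem_rowsB_le hm
    have hmask : maskB m < 16 := by
      have h1 := maskB_lt m
      have h2 : (2 : Nat) ^ m.length ≤ 2 ^ 4 := Nat.pow_le_pow_right (by omega) hm4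
      omega
    have hbg : (((List.range 16).map
          (fun mm => (rowsB oc).filter (fun o => mm &&& maskB o == 0))).getD (maskB m) [])
        = (rowsB oc).filter (fun o => maskB m &&& maskB o == 0) := by
      rw [List.getD_eq_getElem?_getD, List.getElem?_map]
      simp [hmask]
    rw [hbg]
    refine congrArg _ (List.filter_congr (fun o ho => ?_)).symm
    have ho4 : o.length = 4 := mem_rowsB_eq4 hpre ho
    rw [isvalidA_eq_validN, validN_eq_mask m o (by omega)]
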